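-- pv_equiv track=rewrite | github.com/pdmourao/NoNsEx | MCfuncs_tf.py | IsDisentangled
-- ===== SOURCE A (Python) =====
-- def IsDisentangled(m, cutoff):
--     m_entries = []
--     for m1 in m:
--         for idx2, m2 in enumerate(m1):
--             if m2 > cutoff:
--                 m_entries.append(idx2)
--     if len(set(m_entries)) == 3:
--         return True
--     else:
--         return False
-- ===== SOURCE B (Python) =====
-- def IsDisentangled(m, cutoff):
--     width = 0
--     for row in m:
--         if len(row) > width:
--             width = len(row)
--     count = 0
--     for j in range(width):
--         if any(len(row) > j and row[j] > cutoff for row in m):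
--             count += 1
--     return count == 3
-- ===== Notes on version B (the rewrite author's own statement) =====
-- stated objective: alternative
-- what changed: B traverses column-wise: it computes the maximum row width, then counts column indices j for which some row has an entry > cutoff at j, instead of appending every hit row-by-row and deduplicating afterwards.
import Mathlib
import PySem

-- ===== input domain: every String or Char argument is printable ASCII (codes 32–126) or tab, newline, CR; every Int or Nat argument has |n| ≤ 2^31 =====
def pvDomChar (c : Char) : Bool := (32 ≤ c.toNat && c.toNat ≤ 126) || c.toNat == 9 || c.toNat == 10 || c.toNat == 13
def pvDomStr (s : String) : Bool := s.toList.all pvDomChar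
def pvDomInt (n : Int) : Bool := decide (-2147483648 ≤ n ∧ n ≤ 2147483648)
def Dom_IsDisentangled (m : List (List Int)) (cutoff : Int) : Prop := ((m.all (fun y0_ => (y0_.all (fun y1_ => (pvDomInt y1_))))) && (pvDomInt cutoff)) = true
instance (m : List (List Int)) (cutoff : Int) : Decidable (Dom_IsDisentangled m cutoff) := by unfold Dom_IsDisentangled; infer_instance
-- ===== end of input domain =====

-- B traverses column-wise (max width, then counts columns where some row exceeds the cutoff)
-- instead of A's row-wise append-then-dedup; an alternative of similar cost, not claimed faster.

-- ===== PORT A =====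
-- literal port: append the column index of every entry > cutoff, then len(set(...)) == 3
def IsDisentangled (m : List (List Int)) (cutoff : Int) : Bool :=
  let m_entries : List Int :=
    m.foldl (fun acc m1 =>
      (PySem.List.enumerate m1).foldl
        (fun acc2 p => if p.2 > cutoff then acc2 ++ [p.1] else acc2) acc) []
  decide (PySem.Set.len (PySem.Set.ofList m_entries) = 3)

-- ===== PORT B =====
-- literal port of Source B: compute the maximum row width, then count column indices j in
-- range(width) such that some row has length > j and entry > cutoff at j; return count == 3
def IsDisentangled_alt (m : List (List Int)) (cutoff : Int) : Bool :=
  let width : Int :=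
    m.foldl (fun w row => if (row.length : Int) > w then (row.length : Int) else w) 0
  let count : Int :=
    (PySem.List.pyRange 0 width).foldl
      (fun c j =>
        if m.any (fun row => decide ((row.length : Int) > j) &&
                             decide (PySem.List.pyGetD row j 0 > cutoff))
        then c + 1 else c) 0
  decide (count = 3)

-- ===== PRECONDITION & SPEC =====
def Spec_IsDisentangled (m : List (List Int)) (cutoff : Int) (out : Bool) : Prop := out = IsDisentangled_alt m cutoff
instance (m : List (List Int)) (cutoff : Int) (out : Bool) : Decidable (Spec_IsDisentangled m cutoff out) := by unfold Spec_IsDisentangled; infer_instance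

-- ===== CLAIM (what is proved, stated in full; the proofs are below) =====
def Claim_equal_IsDisentangled : Prop := ∀ (m : List (List Int)) (cutoff : Int), Dom_IsDisentangled m cutoff → Spec_IsDisentangled m cutoff (IsDisentangled m cutoff)

-- ===== LEMMAS AND PROOFS =====

-- the Nat-valued maximum row width
def pvWidth (m : List (List Int)) : Nat :=
  m.foldl (fun w row => if row.length > w then row.length else w) 0

-- B's per-column predicate
def pvPredB (m : List (List Int)) (cutoff : Int) (j : Int) : Bool :=
  m.any (fun row => decide ((row.length : Int) > j) &&
                    decide (PySem.List.pyGetD row j 0 > cutoff))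

theorem pvWidthInt_eq (m : List (List Int)) (w : Nat) :
    m.foldl (fun a row => if (row.length : Int) > a then (row.length : Int) else a) (w : Int)
      = ((m.foldl (fun a row => if row.length > a then row.length else a) w : Nat) : Int) := by
  induction m generalizing w with
  | nil => rfl
  | cons r t ih =>
      simp only [List.foldl]
      by_cases h : r.length > w
      · rw [if_pos (show (r.length : Int) > (w : Int) by exact_mod_cast h), if_pos h, ih r.length]
      · rw [if_neg (show ¬ (r.length : Int) > (w : Int) by exact_mod_cast h), if_neg h, ih w]

theorem pvWidth_init_le (m : List (List Int)) (w : Nat) :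
    w ≤ m.foldl (fun a row => if row.length > a then row.length else a) w := by
  induction m generalizing w with
  | nil => simp
  | cons r t ih =>
      simp only [List.foldl]
      by_cases h : r.length > w
      · rw [if_pos h]; exact le_trans (le_of_lt h) (ih _)
      · rw [if_neg h]; exact ih _

theorem pvWidth_le_aux (m : List (List Int)) : ∀ (w : Nat) (row : List Int), row ∈ m →
    row.length ≤ m.foldl (fun a row => if row.length > a then row.length else a) w := by
  induction m with
  | nil => intro w row h; cases h
  | cons r t ih =>
      intro w row h
      simp only [List.foldl]
      rcases List.mem_cons.mp h with h | h
      · subst h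
        by_cases hc : row.length > w
        · rw [if_pos hc]; exact pvWidth_init_le t _
        · rw [if_neg hc]; exact le_trans (Nat.le_of_not_lt hc) (pvWidth_init_le t _)
      · by_cases hc : r.length > w
        · rw [if_pos hc]; exact ih _ _ h
        · rw [if_neg hc]; exact ih _ _ h

theorem pvWidth_le (m : List (List Int)) (row : List Int) (hrow : row ∈ m) :
    row.length ≤ pvWidth m := pvWidth_le_aux m 0 row hrow

-- A's collected entries in closed form
theorem pvEntries_eq (m : List (List Int)) (cutoff : Int) :
    m.foldl (fun acc m1 =>
      (PySem.List.enumerate m1).foldl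
        (fun acc2 p => if p.2 > cutoff then acc2 ++ [p.1] else acc2) acc) []
    = m.flatMap (fun m1 =>
        ((PySem.List.enumerate m1).filter (fun p => decide (p.2 > cutoff))).map
          (fun p => p.1)) := by
  have hfun : (fun (acc : List Int) (m1 : List Int) =>
      (PySem.List.enumerate m1).foldl
        (fun acc2 p => if p.2 > cutoff then acc2 ++ [p.1] else acc2) acc)
      = (fun acc m1 => acc ++
          ((PySem.List.enumerate m1).filter (fun p => decide (p.2 > cutoff))).map
            (fun p => p.1)) := by
    funext acc m1
    simpa using PySem.List.foldl_append_if (fun (p : Int × Int) => decide (p.2 > cutoff)) (fun (p : Int × Int) => p.1) (PySem.List.enumerate m1) acc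
  rw [hfun, PySem.List.foldl_append_eq_flatMap]
  simp

-- membership characterisation of A's entries
theorem pvMem_entries (m : List (List Int)) (cutoff : Int) (x : Int) :
    (x ∈ m.flatMap (fun m1 =>
        ((PySem.List.enumerate m1).filter (fun p => decide (p.2 > cutoff))).map
          (fun p => p.1)))
    ↔ ∃ row ∈ m, ∃ (k : Nat) (h : k < row.length), x = (k : Int) ∧ row[k] > cutoff := by
  simp only [List.mem_flatMap, List.mem_map, List.mem_filter]
  constructor
  · rintro ⟨row, hrow, p, ⟨hpe, hpc⟩, hpx⟩
    rcases (PySem.List.mem_enumerate_iff row 0 p).mp hpe with ⟨k, hk, hpk⟩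
    subst hpk
    exact ⟨row, hrow, k, hk, by simpa using hpx.symm, by simpa using hpc⟩
  · rintro ⟨row, hrow, k, hk, hx, hc⟩
    refine ⟨row, hrow, ((k : Int), row[k]), ⟨?_, by simpa using hc⟩, by simpa using hx.symm⟩
    exact (PySem.List.mem_enumerate_iff row 0 _).mpr ⟨k, hk, by simp⟩

-- B's qualifying-column list
def pvCols (m : List (List Int)) (cutoff : Int) : List Int :=
  ((List.range (pvWidth m)).filter (fun (k : Nat) => pvPredB m cutoff (k : Int))).map
    (fun (k : Nat) => (k : Int))

theorem pvMem_cols (m : List (List Int)) (cutoff : Int) (x : Int) :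
    x ∈ pvCols m cutoff
    ↔ ∃ row ∈ m, ∃ (k : Nat) (h : k < row.length), x = (k : Int) ∧ row[k] > cutoff := by
  unfold pvCols
  constructor
  · intro hx
    rcases List.mem_map.mp hx with ⟨k, hk, rfl⟩
    rcases List.mem_filter.mp hk with ⟨_, hp⟩
    unfold pvPredB at hp
    rcases List.any_eq_true.mp hp with ⟨row, hrow, hb⟩
    rw [Bool.and_eq_true, decide_eq_true_eq, decide_eq_true_eq] at hb
    obtain ⟨hlen, hcut⟩ := hb
    have hkl : k < row.length := by exact_mod_cast hlen
    refine ⟨row, hrow, k, hkl, rfl, ?_⟩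
    rwa [PySem.List.pyGetD_natCast, List.getD_eq_getElem _ _ hkl] at hcut
  · rintro ⟨row, hrow, k, hk, rfl, hc⟩
    apply List.mem_map.mpr
    refine ⟨k, List.mem_filter.mpr ⟨List.mem_range.mpr
      (lt_of_lt_of_le hk (pvWidth_le m row hrow)), ?_⟩, rfl⟩
    unfold pvPredB
    apply List.any_eq_true.mpr
    refine ⟨row, hrow, ?_⟩
    rw [Bool.and_eq_true, decide_eq_true_eq, decide_eq_true_eq]
    exact ⟨by exact_mod_cast hk, by rwa [PySem.List.pyGetD_natCast, List.getD_eq_getElem _ _ hk]⟩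

theorem pvCols_nodup (m : List (List Int)) (cutoff : Int) : (pvCols m cutoff).Nodup := by
  unfold pvCols
  apply List.Nodup.map
  · intro a b hab; simpa using hab
  · exact List.Nodup.filter _ List.nodup_range

theorem pvLen_eq (m : List (List Int)) (cutoff : Int) :
    (PySem.Set.ofList (m.flatMap (fun m1 =>
        ((PySem.List.enumerate m1).filter (fun p => decide (p.2 > cutoff))).map
          (fun p => p.1)))).length
    = (pvCols m cutoff).length := by
  apply List.Perm.length_eq
  rw [List.perm_ext_iff_of_nodup (PySem.Set.nodup_ofList _) (pvCols_nodup m cutoff)]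
  intro a
  rw [PySem.Set.mem_ofList, pvMem_entries, pvMem_cols]

-- ===== VERDICT (by name: the statement is the Claim_ definition above) =====
theorem IsDisentangled_spec : Claim_equal_IsDisentangled := by
  intro m cutoff _
  unfold Spec_IsDisentangled IsDisentangled IsDisentangled_alt
  simp only [pvEntries_eq]
  have hw : m.foldl (fun w row => if (row.length : Int) > w then (row.length : Int) else w) 0
      = ((pvWidth m : Nat) : Int) := by
    simpa [pvWidth] using pvWidthInt_eq m 0
  rw [hw, PySem.List.foldl_count_if
        (fun j => m.any (fun row => decide ((row.length : Int) > j) &&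
                                    decide (PySem.List.pyGetD row j 0 > cutoff)))]
  rw [PySem.List.pyRange_zero_natCast, List.countP_map]
  have hcount : ((List.range (pvWidth m)).countP
        ((fun j => m.any (fun row => decide ((row.length : Int) > j) &&
                   decide (PySem.List.pyGetD row j 0 > cutoff))) ∘ (fun (k : Nat) => (k : Int))))
      = (pvCols m cutoff).length := by
    unfold pvCols pvPredB
    simp only [List.length_map, List.countP_eq_length_filter, Function.comp_def]
  have hSetLen : PySem.Set.len (PySem.Set.ofList (m.flatMap (fun m1 =>
      ((PySem.List.enumerate m1).filter (fun p => decide (p.2 > cutoff))).map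
        (fun p => p.1))))
      = ((pvCols m cutoff).length : Int) := by
    simp [PySem.Set.len, pvLen_eq m cutoff]
  rw [hSetLen]
  rw [hcount]
  exact decide_eq_decide.mpr (by omega)
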